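-- pv_equiv track=rewrite | github.com/stardust1689/Exercises | exercises.py | meme_sum
-- ===== SOURCE A (Python) =====
-- def meme_sum(num1, num2):
--     '''
--     "Adds" two numbers incorrectly, instead using the method shown on https://en.meming.world/wiki/Girl_at_Whiteboard_Adding
--     '''
--     total = []
--     lst1 = list(str(num1))
--     lst2 = list(str(num2))
--
--     while len(lst1) != len(lst2):
--         lst2.insert(0,0) if len(lst1) > len(lst2) else lst1.insert(0,0)
--
--     for digit in range(len(lst1)):
--         total.append( str(int(lst1[digit]) + int(lst2[digit])) )
--
--     return int(''.join(total))
-- ===== SOURCE B (Python) =====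
-- def meme_sum(num1, num2):
--     def go(r1, r2):
--         if not r1 and not r2:
--             return ''
--         d1 = int(r1[0]) if r1 else 0
--         d2 = int(r2[0]) if r2 else 0
--         return go(r1[1:], r2[1:]) + str(d1 + d2)
--     return int(go(list(str(num1))[::-1], list(str(num2))[::-1]))
-- ===== Notes on version B (the rewrite author's own statement) =====
-- stated objective: alternative
-- what changed: B replaces A's front-padding while-loop, index-based for-loop appending digit-sum strings to a list, and final ''.join by a recursion over the two reversed digit lists that needs no padding (an exhausted list contributes 0) and builds the result string back-to-front.
import Mathlib
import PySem

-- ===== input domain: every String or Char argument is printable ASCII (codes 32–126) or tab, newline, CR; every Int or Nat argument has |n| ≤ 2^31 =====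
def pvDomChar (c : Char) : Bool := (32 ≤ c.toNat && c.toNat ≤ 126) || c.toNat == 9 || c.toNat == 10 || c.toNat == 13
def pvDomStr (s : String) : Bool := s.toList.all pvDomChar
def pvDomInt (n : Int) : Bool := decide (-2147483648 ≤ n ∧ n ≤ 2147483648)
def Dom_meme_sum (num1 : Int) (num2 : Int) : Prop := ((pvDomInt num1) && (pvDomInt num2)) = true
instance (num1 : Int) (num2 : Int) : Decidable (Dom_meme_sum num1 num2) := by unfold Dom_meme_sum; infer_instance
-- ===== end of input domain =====

-- ===== PORT A =====
-- B differs by decomposition: recursion over the reversed digit lists building the result string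
-- back-to-front, with zero-defaulting instead of A's front-padding loop + index loop + join.

-- int(x) applied to a single digit (Python raises ValueError on a non-digit; those inputs are outside
-- Pre_meme_sum, so the .getD default is never the returned path there)
def pyDigit (c : Char) : Int := (PySem.Int.ofChars? [c]).getD 0

-- the `while len(lst1) != len(lst2)` padding loop; Python inserts the int 0, whose int() value equals
-- that of the char '0', so the pad is modelled by '0' (exact: the entries are only ever passed to int())
def memePad (lst1 lst2 : List Char) : List Char × List Char :=
  if lst1.length ≠ lst2.length then
    if lst2.length < lst1.length then memePad lst1 ('0' :: lst2)
    else memePad ('0' :: lst1) lst2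
  else (lst1, lst2)
termination_by (lst1.length - lst2.length) + (lst2.length - lst1.length)
decreasing_by all_goals simp; omega

def meme_sum (num1 : Int) (num2 : Int) : Int :=
  let lst1 := PySem.Int.toChars num1
  let lst2 := PySem.Int.toChars num2
  let p := memePad lst1 lst2
  -- for digit in range(len(lst1)): total.append(str(int(lst1[digit]) + int(lst2[digit])))
  -- (the index is always in range, so lst[digit] is modelled by pyGetD with an unreachable default)
  let total := (PySem.List.pyRange 0 (p.1.length : Int) 1).foldl
    (fun total digit =>
      total ++ [PySem.Int.toChars (pyDigit (PySem.List.pyGetD p.1 digit '0')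
                                 + pyDigit (PySem.List.pyGetD p.2 digit '0'))]) ([] : List (List Char))
  -- int(''.join(total)): total is nonempty inside Pre_ and all digits, so ofChars? is some there
  (PySem.Int.ofChars? (PySem.Chars.join [] total)).getD 0

-- ===== PORT B =====
-- def go(r1, r2): recursion on the reversed digit lists, appending str(d1+d2) after the recursive call
def memeGo (r1 r2 : List Char) : List Char :=
  if r1 = [] ∧ r2 = [] then []
  else
    let d1 : Int := match r1 with | [] => 0 | c :: _ => pyDigit c
    let d2 : Int := match r2 with | [] => 0 | c :: _ => pyDigit c
    memeGo (PySem.List.slice r1 (some 1)) (PySem.List.slice r2 (some 1)) ++ PySem.Int.toChars (d1 + d2)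
termination_by r1.length + r2.length
decreasing_by
  all_goals rw [PySem.List.slice_from r1 (by omega : (0:Int) ≤ 1), PySem.List.slice_from r2 (by omega : (0:Int) ≤ 1)]
  all_goals rename_i h; rcases r1 with _|⟨a,t⟩ <;> rcases r2 with _|⟨b,s⟩ <;> simp_all <;> omega

def meme_sum_alt (num1 : Int) (num2 : Int) : Int :=
  -- list(str(num))[::-1] is the reversed digit list (slice? with step -1; none only for step 0)
  (PySem.Int.ofChars? (memeGo
      ((PySem.List.slice? (PySem.Int.toChars num1) none none (-1)).getD [])
      ((PySem.List.slice? (PySem.Int.toChars num2) none none (-1)).getD []))).getD 0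

-- ===== PRECONDITION & SPEC =====
-- Pre_ excludes negative arguments: there str(num) contains '-', and both A and B raise ValueError at int('-')
def Pre_meme_sum (num1 : Int) (num2 : Int) : Prop := 0 ≤ num1 ∧ 0 ≤ num2
instance (num1 : Int) (num2 : Int) : Decidable (Pre_meme_sum num1 num2) := by unfold Pre_meme_sum; infer_instance
def pvWitness_meme_sum : Int × Int := (26, 39)

def Spec_meme_sum (num1 : Int) (num2 : Int) (out : Int) : Prop := out = meme_sum_alt num1 num2
instance (num1 : Int) (num2 : Int) (out : Int) : Decidable (Spec_meme_sum num1 num2 out) := by unfold Spec_meme_sum; infer_instance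

-- ===== CLAIM (what is proved, stated in full; the proofs are below) =====
def Claim_equal_meme_sum : Prop := ∀ (num1 : Int) (num2 : Int), Dom_meme_sum num1 num2 → Pre_meme_sum num1 num2 → Spec_meme_sum num1 num2 (meme_sum num1 num2)

-- ===== LEMMAS AND PROOFS =====

-- the digit-sum blocks of two equal-length digit lists, in order
def memeBlocks (p1 p2 : List Char) : List Char :=
  ((p1.zip p2).map (fun ab => PySem.Int.toChars (pyDigit ab.1 + pyDigit ab.2))).flatten

theorem memePad_eq (l1 l2 : List Char) :
    memePad l1 l2 = (List.replicate (l2.length - l1.length) '0' ++ l1,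
                     List.replicate (l1.length - l2.length) '0' ++ l2) := by
  fun_induction memePad l1 l2 with
  | case1 l1 l2 hne hlt ih =>
      rw [ih]
      have h1 : l2.length + 1 - l1.length = 0 := by omega
      have h2 : l1.length - l2.length = (l1.length - (l2.length + 1)) + 1 := by omega
      simp at h1 ⊢
      constructor
      · omega
      · rw [h2, List.replicate_succ', List.append_assoc]; simp
  | case2 l1 l2 hne hge ih =>
      rw [ih]
      have h2 : l2.length - l1.length = (l2.length - (l1.length + 1)) + 1 := by omega
      simp at ⊢
      constructor
      · rw [h2, List.replicate_succ', List.append_assoc]; simp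
      · omega
  | case3 l1 l2 heq =>
      simp at heq
      simp [heq]

theorem memeBlocks_concat (q1 q2 : List Char) (a b : Char) (h : q1.length = q2.length) :
    memeBlocks (q1 ++ [a]) (q2 ++ [b]) = memeBlocks q1 q2 ++ PySem.Int.toChars (pyDigit a + pyDigit b) := by
  simp [memeBlocks, List.zip_append h]

theorem joinNil (ts : List (List Char)) : PySem.Chars.join [] ts = ts.flatten := by
  show ([]:List Char).intercalate ts = ts.flatten
  induction ts with
  | nil => rfl
  | cons t ts ih => cases ts with
      | nil => simp [List.intercalate]
      | cons u us =>
          simp only [List.intercalate, List.intersperse] at ih ⊢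
          simp_all [List.flatten]

theorem foldRange_eq (p1 p2 : List Char) (h : p1.length = p2.length) :
    (PySem.List.pyRange 0 (p1.length : Int) 1).foldl
      (fun total digit =>
        total ++ [PySem.Int.toChars (pyDigit (PySem.List.pyGetD p1 digit '0')
                                   + pyDigit (PySem.List.pyGetD p2 digit '0'))]) ([] : List (List Char))
      = (p1.zip p2).map (fun ab => PySem.Int.toChars (pyDigit ab.1 + pyDigit ab.2)) := by
  rw [PySem.List.foldl_append_singleton_eq_map]
  simp only [List.nil_append]
  induction p1 using List.reverseRecOn generalizing p2 with
  | nil => simp [PySem.List.pyRange]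
  | append_singleton q1 a ih =>
      rcases List.eq_nil_or_concat p2 with h2 | ⟨q2, b, h2⟩
      · subst h2; simp at h
      · subst h2
        rw [List.concat_eq_append] at h ⊢
        have hq : q1.length = q2.length := by simp at h; omega
        have hr : ((q1 ++ [a]).length : Int) = (q1.length : Int) + 1 := by simp
        rw [hr, PySem.List.pyRange_one_succ_right (by positivity), List.map_append,
            List.zip_append hq, List.map_append]
        congr 1
        · rw [← ih q2 hq]
          apply List.map_congr_left
          intro i hi
          rw [PySem.List.mem_pyRange_one] at hi
          rw [PySem.List.pyGetD_eq_getElem _ _ hi.1 (by simp; omega),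
              PySem.List.pyGetD_eq_getElem _ _ hi.1 (by simp; omega),
              PySem.List.pyGetD_eq_getElem _ _ hi.1 (by omega),
              PySem.List.pyGetD_eq_getElem _ _ hi.1 (by omega),
              List.getElem_append_left (by omega), List.getElem_append_left (by omega)]
        · have g1 : PySem.List.pyGetD (q1 ++ [a]) (q1.length : Int) '0' = a := by
            rw [PySem.List.pyGetD_eq_getElem _ _ (by positivity) (by simp)]
            simp
          have g2 : PySem.List.pyGetD (q2 ++ [b]) (q1.length : Int) '0' = b := by
            rw [PySem.List.pyGetD_eq_getElem _ _ (by positivity) (by simp; omega)]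
            simp [hq]
          simp [g1, g2]

theorem pyDigit_zero : pyDigit '0' = 0 := by decide

theorem memeGo_eq (r1 r2 : List Char) :
    memeGo r1 r2 = memeBlocks ((r1 ++ List.replicate (r2.length - r1.length) '0').reverse)
                              ((r2 ++ List.replicate (r1.length - r2.length) '0').reverse) := by
  fun_induction memeGo r1 r2 with
  | case1 r1 r2 hnil =>
      obtain ⟨h1, h2⟩ := hnil; subst h1; subst h2; simp [memeBlocks]
  | case2 r1 r2 hnil d1 d2 ih =>
      rw [PySem.List.slice_from r1 (by omega : (0:Int) ≤ 1),
          PySem.List.slice_from r2 (by omega : (0:Int) ≤ 1)] at ih ⊢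
      simp only [Int.toNat_one] at ih ⊢
      rcases r1 with _|⟨a,t1⟩ <;> rcases r2 with _|⟨b,t2⟩
      · simp at hnil
      · -- r1 = [], r2 = b :: t2
        have hd1 : d1 = 0 := rfl
        have hd2 : d2 = pyDigit b := rfl
        simp only [List.drop_nil, List.drop_succ_cons, List.drop_zero] at ih ⊢
        rw [ih, hd1, hd2]
        simp only [List.length_nil, List.length_cons, Nat.zero_sub, Nat.sub_zero,
          List.replicate_zero, List.nil_append, List.append_nil, List.reverse_replicate,
          List.reverse_cons]
        rw [List.replicate_succ', memeBlocks_concat _ _ _ _ (by simp), pyDigit_zero]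
      · -- r1 = a :: t1, r2 = []
        have hd1 : d1 = pyDigit a := rfl
        have hd2 : d2 = 0 := rfl
        simp only [List.drop_nil, List.drop_succ_cons, List.drop_zero] at ih ⊢
        rw [ih, hd1, hd2]
        simp only [List.length_nil, List.length_cons, Nat.zero_sub, Nat.sub_zero,
          List.replicate_zero, List.nil_append, List.append_nil, List.reverse_replicate,
          List.reverse_cons]
        rw [List.replicate_succ', memeBlocks_concat _ _ _ _ (by simp), pyDigit_zero]
      · -- both cons
        have hd1 : d1 = pyDigit a := rfl
        have hd2 : d2 = pyDigit b := rfl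
        simp only [List.drop_succ_cons, List.drop_zero] at ih ⊢
        rw [ih, hd1, hd2]
        simp only [List.length_cons, Nat.succ_sub_succ]
        rw [List.cons_append, List.reverse_cons, List.cons_append, List.reverse_cons]
        rw [memeBlocks_concat _ _ _ _ (by simp; omega)]
-- ===== VERDICT (by name: the statement is the Claim_ definition above) =====
theorem meme_sum_spec : Claim_equal_meme_sum := by
  intro num1 num2 _ _
  unfold Spec_meme_sum meme_sum meme_sum_alt
  simp only [memePad_eq, PySem.List.slice?_none_none_neg_one, Option.getD_some]
  set l1 := PySem.Int.toChars num1 with hl1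
  set l2 := PySem.Int.toChars num2 with hl2
  have hlen : (List.replicate (l2.length - l1.length) '0' ++ l1).length
      = (List.replicate (l1.length - l2.length) '0' ++ l2).length := by simp; omega
  rw [foldRange_eq _ _ hlen, joinNil, memeGo_eq]
  simp only [List.length_reverse, List.reverse_append, List.reverse_replicate, List.reverse_reverse]
  rfl
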